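-- pv_equiv track=rewrite | github.com/pypi-data/pypi-mirror-401 | packages/pylittleeegle/pylittleeegle-0.1.1-py3-none-any.whl/pylittleeegle/utils.py | mark2stim
-- ===== SOURCE A (Python) =====
-- from typing import List, Optional
--
-- def mark2stim(mark: List[List[int]],
--               ns: int,
--               offset: int = 0,
--               code: Optional[List[int]] = None) -> List[int]:
--     """
--     Reverse transformation of stim2mark.
--
--     Args:
--         mark: list of marker vectors
--         ns: number of samples for the output stimulation vector
--         offset: offset for marker positions (default: 0)
--         code: optional code vector. If an offset has been used in stim2mark,
--               -offset must be used here in order to get back the original stimulation vector.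
--
--     Note:
--         If code is provided, it must not contain 0.
--
--     Returns:
--         A stimulation vector of length ns
--
--     Examples: see stim2mark
--     """
--     stim = [0] * ns
--
--     if code is None:
--         unic = [0] + list(range(1, len(mark) + 1))  # [0, 1, 2, ..., len(mark)]
--     else:
--         unic = [0] + sorted(code)
--
--     for z in range(len(mark)):
--         for j in mark[z]:
--             if 0 <= j + offset < ns:  # Bounds checking
--                 stim[j + offset] = unic[z + 1]
--
--     return stim
-- ===== SOURCE B (Python) =====
-- from typing import List, Optional
--
-- def mark2stim(mark: List[List[int]],
--               ns: int,
--               offset: int = 0,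
--               code: Optional[List[int]] = None) -> List[int]:
--     unic = [0] + (sorted(code) if code is not None else list(range(1, len(mark) + 1)))
--     # flatten the surviving writes, then resolve conflicts by FIRST write in
--     # reverse order (= last write in program order), then materialise once
--     writes = [(j + offset, unic[z + 1])
--               for z, row in enumerate(mark)
--               for j in row
--               if 0 <= j + offset < ns]
--     winner = {}
--     for p, v in reversed(writes):
--         winner.setdefault(p, v)
--     return [winner.get(i, 0) for i in range(ns)]
-- ===== Notes on version B (the rewrite author's own statement) =====
-- stated objective: alternative
-- what changed: B replaces A's scatter (in-place index assignments into a preallocated length-ns list) by a gather pipeline: it flattens the surviving (position, value) writes into one list, resolves conflicts by first-match over the reversed write list via dict.setdefault (= last-write-wins in program order), and materialises the output in a single comprehension over range(ns).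
import Mathlib
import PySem

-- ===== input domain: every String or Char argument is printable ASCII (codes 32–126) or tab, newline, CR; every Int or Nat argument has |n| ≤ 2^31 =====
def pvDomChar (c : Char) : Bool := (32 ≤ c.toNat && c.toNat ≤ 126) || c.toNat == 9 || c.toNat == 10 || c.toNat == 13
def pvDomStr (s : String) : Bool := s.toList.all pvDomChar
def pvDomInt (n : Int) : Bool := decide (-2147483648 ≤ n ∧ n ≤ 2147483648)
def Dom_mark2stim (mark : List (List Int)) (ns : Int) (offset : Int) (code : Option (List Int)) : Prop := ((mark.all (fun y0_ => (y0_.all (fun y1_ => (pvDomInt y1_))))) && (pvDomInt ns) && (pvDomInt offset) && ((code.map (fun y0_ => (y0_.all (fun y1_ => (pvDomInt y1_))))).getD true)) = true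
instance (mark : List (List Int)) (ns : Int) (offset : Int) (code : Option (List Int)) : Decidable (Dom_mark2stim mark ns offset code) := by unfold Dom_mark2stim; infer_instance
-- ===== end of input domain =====

-- B replaces A's scatter of in-place writes into a preallocated list by a gather pipeline:
-- flatten the surviving writes, resolve conflicts by FIRST match over the reversed write
-- list (setdefault), then materialise the output in one pass (alternative structure, same cost).

-- ===== PORT A =====
-- `unic[z+1]` raises IndexError when code is given with fewer codes than marker rows and
-- such a row has an in-range position; Pre_mark2stim excludes exactly those inputs, so the
-- `.getD 0` default of pyGetD is never reached on admitted inputs.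
def mark2stim (mark : List (List Int)) (ns : Int) (offset : Int) (code : Option (List Int)) : List Int :=
  let stim : List Int := List.replicate ns.toNat 0
  let unic : List Int :=
    match code with
    | none => 0 :: PySem.List.pyRange 1 ((mark.length : Int) + 1) 1
    | some c => 0 :: PySem.List.sorted c (fun x => x)
  (PySem.List.pyRange 0 (mark.length : Int) 1).foldl (fun stim z =>
    (PySem.List.pyGetD mark z []).foldl (fun stim j =>
      if 0 ≤ j + offset ∧ j + offset < ns then
        stim.set (j + offset).toNat (PySem.List.pyGetD unic (z + 1) 0)
      else stim) stim) stim

-- ===== PORT B =====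
def mark2stim_alt (mark : List (List Int)) (ns : Int) (offset : Int) (code : Option (List Int)) : List Int :=
  let unic : List Int :=
    match code with
    | some c => 0 :: PySem.List.sorted c (fun x => x)
    | none => 0 :: PySem.List.pyRange 1 ((mark.length : Int) + 1) 1
  let writes : List (Int × Int) :=
    (PySem.List.enumerate mark 0).flatMap (fun p =>
      p.2.filterMap (fun j =>
        if 0 ≤ j + offset ∧ j + offset < ns then
          some (j + offset, PySem.List.pyGetD unic (p.1 + 1) 0)
        else none))
  let winner : PySem.Dict Int Int :=
    writes.reverse.foldl (fun d pv => d.setdefault pv.1 pv.2) PySem.Dict.empty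
  (PySem.List.pyRange 0 ns 1).map (fun i => winner.getD i 0)

-- ===== PRECONDITION & SPEC =====
-- Pre_ excludes exactly the inputs where Python A raises IndexError on unic[z+1]: a given
-- code list shorter than mark whose extra rows contain an in-range position.
def Pre_mark2stim (mark : List (List Int)) (ns : Int) (offset : Int) (code : Option (List Int)) : Prop :=
  match code with
  | none => True
  | some c => ∀ row ∈ mark.drop c.length, ∀ j ∈ row, ¬ (0 ≤ j + offset ∧ j + offset < ns)
instance (mark : List (List Int)) (ns : Int) (offset : Int) (code : Option (List Int)) : Decidable (Pre_mark2stim mark ns offset code) := by unfold Pre_mark2stim; cases code <;> infer_instance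
def pvWitness_mark2stim : List (List Int) × Int × Int × Option (List Int) := ([[0, 2], [1]], 4, 0, none)
def Spec_mark2stim (mark : List (List Int)) (ns : Int) (offset : Int) (code : Option (List Int)) (out : List Int) : Prop := out = mark2stim_alt mark ns offset code
instance (mark : List (List Int)) (ns : Int) (offset : Int) (code : Option (List Int)) (out : List Int) : Decidable (Spec_mark2stim mark ns offset code out) := by unfold Spec_mark2stim; infer_instance

-- ===== CLAIM (what is proved, stated in full; the proofs are below) =====
def Claim_equal_mark2stim : Prop := ∀ (mark : List (List Int)) (ns : Int) (offset : Int) (code : Option (List Int)), Dom_mark2stim mark ns offset code → Pre_mark2stim mark ns offset code → Spec_mark2stim mark ns offset code (mark2stim mark ns offset code)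

-- ===== LEMMAS AND PROOFS =====

-- folding set-writes preserves the list length
theorem pv_len_foldl_set (ws : List (Int × Int)) :
    ∀ stim : List Int,
      (ws.foldl (fun s pv => s.set pv.1.toNat pv.2) stim).length = stim.length := by
  induction ws with
  | nil => intro stim; rfl
  | cons pv rest ih => intro stim; simp [List.foldl_cons, ih, List.length_set]

-- A's inner loop over a row = folding set over the row's filtered write list
theorem pv_inner (ns offset v : Int) (row : List Int) :
    ∀ s : List Int,
      row.foldl (fun s j =>
          if 0 ≤ j + offset ∧ j + offset < ns then s.set (j + offset).toNat v else s) s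
      = (row.filterMap (fun j =>
          if 0 ≤ j + offset ∧ j + offset < ns then some (j + offset, v) else none)).foldl
          (fun s pv => s.set pv.1.toNat pv.2) s := by
  induction row with
  | nil => intro s; rfl
  | cons j rest ih =>
    intro s
    simp only [List.foldl_cons, List.filterMap_cons]
    by_cases h : 0 ≤ j + offset ∧ j + offset < ns
    · rw [if_pos h, if_pos h]; simp only [List.foldl_cons]; exact ih _
    · rw [if_neg h, if_neg h]; exact ih s

-- A's outer loop = folding set over the flattened write list
theorem pv_outer (ns offset : Int) (val : Int → Int) (pairs : List (Int × List Int)) :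
    ∀ s : List Int,
      pairs.foldl (fun s p =>
          p.2.foldl (fun s j =>
            if 0 ≤ j + offset ∧ j + offset < ns then s.set (j + offset).toNat (val p.1)
            else s) s) s
      = (pairs.flatMap (fun p => p.2.filterMap (fun j =>
          if 0 ≤ j + offset ∧ j + offset < ns then some (j + offset, val p.1) else none))).foldl
          (fun s pv => s.set pv.1.toNat pv.2) s := by
  induction pairs with
  | nil => intro s; rfl
  | cons p rest ih =>
    intro s
    simp only [List.foldl_cons, List.flatMap_cons, List.foldl_append]
    rw [pv_inner ns offset (val p.1) p.2 s, ih]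

-- the value folding set-writes leaves at index i is the first match in the reversed list
theorem pv_getA (ws : List (Int × Int)) (stim : List Int)
    (hpos : ∀ pv ∈ ws, 0 ≤ pv.1 ∧ pv.1 < (stim.length : Int)) (i : Nat) :
    (ws.foldl (fun s pv => s.set pv.1.toNat pv.2) stim)[i]?
      = (match ws.reverse.find? (fun pv => pv.1 == (i : Int)) with
         | some pv => some pv.2
         | none => stim[i]?) := by
  induction ws using List.reverseRecOn with
  | nil => simp
  | append_singleton l pv ih =>
    have hl : ∀ q ∈ l, 0 ≤ q.1 ∧ q.1 < (stim.length : Int) := by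
      intro q hq; exact hpos q (List.mem_append_left _ hq)
    have hpv : 0 ≤ pv.1 ∧ pv.1 < (stim.length : Int) := by
      exact hpos pv (List.mem_append_right _ (List.mem_singleton.mpr rfl))
    rw [List.foldl_append]
    simp only [List.foldl_cons, List.foldl_nil, List.reverse_append, List.reverse_singleton,
      List.singleton_append, List.find?_cons]
    by_cases hb : pv.1 == (i : Int)
    · have hi : pv.1.toNat = i := by
        have : pv.1 = (i : Int) := by exact_mod_cast (beq_iff_eq.mp hb)
        omega
      have hlen : i < (l.foldl (fun s q => s.set q.1.toNat q.2) stim).length := by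
        rw [pv_len_foldl_set]; omega
      simp [hb, hi, hlen]
    · have hi : pv.1.toNat ≠ i := by
        have : pv.1 ≠ (i : Int) := by
          intro h; exact hb (beq_iff_eq.mpr h)
        omega
      simp only [hb]
      rw [List.getElem?_set_ne hi]
      exact ih hl

-- a setdefault loop keeps the first binding of every key
theorem pv_getB (L : List (Int × Int)) :
    ∀ (d : PySem.Dict Int Int) (i : Int),
      (L.foldl (fun d pv => d.setdefault pv.1 pv.2) d).get? i
        = (match d.get? i with
           | some v => some v
           | none => (L.find? (fun pv => pv.1 == i)).map Prod.snd) := by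
  induction L with
  | nil => intro d i; cases h : d.get? i <;> simp [h]
  | cons pv rest ih =>
    intro d i
    simp only [List.foldl_cons, List.find?_cons]
    rw [ih]
    by_cases hb : pv.1 == i
    · have he : pv.1 = i := beq_iff_eq.mp hb
      subst he
      rw [PySem.Dict.get?_setdefault_self]
      cases h : d.get? pv.1 <;> simp
    · have hne : i ≠ pv.1 := by intro h; exact hb (beq_iff_eq.mpr h.symm)
      rw [PySem.Dict.get?_setdefault_of_ne _ _ hne]
      simp [hb]

-- every flattened write targets an in-range position
theorem pv_writes_pos (ns offset : Int) (val : Int → Int) (pairs : List (Int × List Int)) :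
    ∀ pv ∈ pairs.flatMap (fun p => p.2.filterMap (fun j =>
        if 0 ≤ j + offset ∧ j + offset < ns then some (j + offset, val p.1) else none)),
      0 ≤ pv.1 ∧ pv.1 < ns := by
  intro pv hpv
  simp only [List.mem_flatMap, List.mem_filterMap] at hpv
  obtain ⟨p, _, j, _, hj⟩ := hpv
  by_cases h : 0 ≤ j + offset ∧ j + offset < ns
  · rw [if_pos h] at hj; cases hj; exact h
  · rw [if_neg h] at hj; cases hj

-- main bridge: scatter fold on a zero list = gather through the setdefault dict
theorem pv_main (ns : Int) (ws : List (Int × Int)) (hpos : ∀ pv ∈ ws, 0 ≤ pv.1 ∧ pv.1 < ns) :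
    ws.foldl (fun s pv => s.set pv.1.toNat pv.2) (List.replicate ns.toNat 0)
      = (PySem.List.pyRange 0 ns 1).map (fun i =>
          (ws.reverse.foldl (fun d pv => d.setdefault pv.1 pv.2) PySem.Dict.empty).getD i 0) := by
  apply List.ext_getElem?
  intro i
  by_cases hi : i < ns.toNat
  · have hpos' : ∀ pv ∈ ws, 0 ≤ pv.1 ∧ pv.1 < ((List.replicate ns.toNat (0:Int)).length : Int) := by
      intro pv hpv
      have := hpos pv hpv
      simp only [List.length_replicate]
      omega
    rw [pv_getA ws _ hpos' i]
    have hmap : ((PySem.List.pyRange 0 ns 1).map (fun i =>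
        (ws.reverse.foldl (fun d pv => d.setdefault pv.1 pv.2) PySem.Dict.empty).getD i 0))[i]?
        = some ((ws.reverse.foldl (fun d pv => d.setdefault pv.1 pv.2) PySem.Dict.empty).getD (i : Int) 0) := by
      have hlen : i < (PySem.List.pyRange 0 ns 1).length := by
        rw [PySem.List.length_pyRange_one]; omega
      rw [List.getElem?_map, List.getElem?_eq_getElem hlen]
      simp [PySem.List.getElem_pyRange_one]
    rw [hmap, PySem.Dict.getD_eq_get?_getD, pv_getB]
    simp only [PySem.Dict.get?_empty]
    cases h : ws.reverse.find? (fun pv => pv.1 == (i : Int)) with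
    | none => simp [hi]
    | some pv => simp
  · have h1 : (ws.foldl (fun s pv => s.set pv.1.toNat pv.2) (List.replicate ns.toNat (0:Int)))[i]? = none := by
      apply List.getElem?_eq_none
      rw [pv_len_foldl_set, List.length_replicate]; omega
    have h2 : ((PySem.List.pyRange 0 ns 1).map (fun i =>
        (ws.reverse.foldl (fun d pv => d.setdefault pv.1 pv.2) PySem.Dict.empty).getD i 0))[i]? = none := by
      apply List.getElem?_eq_none
      rw [List.length_map, PySem.List.length_pyRange_one]; omega
    rw [h1, h2]

-- assembly: A's nested loop over pyRange equals B's gather pipeline, for any unic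
theorem pv_assemble (mark : List (List Int)) (ns offset : Int) (unic : List Int) :
    (PySem.List.pyRange 0 (mark.length : Int) 1).foldl (fun stim z =>
      (PySem.List.pyGetD mark z []).foldl (fun stim j =>
        if 0 ≤ j + offset ∧ j + offset < ns then
          stim.set (j + offset).toNat (PySem.List.pyGetD unic (z + 1) 0)
        else stim) stim) (List.replicate ns.toNat 0)
    = (PySem.List.pyRange 0 ns 1).map (fun i =>
        (((PySem.List.enumerate mark 0).flatMap (fun p => p.2.filterMap (fun j =>
            if 0 ≤ j + offset ∧ j + offset < ns then
              some (j + offset, PySem.List.pyGetD unic (p.1 + 1) 0)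
            else none))).reverse.foldl (fun d pv => d.setdefault pv.1 pv.2)
          PySem.Dict.empty).getD i 0) := by
  rw [PySem.List.enumerate_eq_map_pyRange (xs := mark) (d := ([] : List Int))]
  rw [← pv_main ns _ (by
    rw [← PySem.List.enumerate_eq_map_pyRange (xs := mark) (d := ([] : List Int))]
    exact pv_writes_pos ns offset (fun z => PySem.List.pyGetD unic (z + 1) 0)
      (PySem.List.enumerate mark 0))]
  have h2 := pv_outer ns offset (fun z => PySem.List.pyGetD unic (z + 1) 0)
    ((PySem.List.pyRange 0 (mark.length : Int) 1).map
      (fun j => (j, PySem.List.pyGetD mark j [])))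
    (List.replicate ns.toNat 0)
  simp only [List.foldl_map, List.flatMap_map] at h2 ⊢
  exact h2

-- ===== VERDICT (by name: the statement is the Claim_ definition above) =====
theorem mark2stim_spec : Claim_equal_mark2stim := by
  intro mark ns offset code _ _
  unfold Spec_mark2stim mark2stim mark2stim_alt
  cases code <;> exact pv_assemble mark ns offset _
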